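-- pv_equiv track=rewrite | github.com/daniel-reich/ubiquitous-fiesta | hv572GaPtbqwhJpTb_15.py | elasticize
-- ===== SOURCE A (Python) =====
-- def elasticize(word):
--   fin = ''
--   if len(word) % 2 == 1:
--     mults = [a+1 for a in list(range(len(word)//2))+list(range(len(word)//2,-1,-1))]
--   else:
--     mults = [a+1 for a in list(range(len(word)//2))] + sorted([a+1 for a in list(range(len(word)//2))],reverse=True)
--   for a,b in zip(word,mults):
--     fin += a*b
--   return fin
-- ===== SOURCE B (Python) =====
-- def elasticize(word):
--     # Two-pointer peeling: strip the outermost pair of characters, emitting the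
--     # left one into `parts` and the right one into `tail`, with the repetition
--     # count d growing by one per layer; no multiplier list and no per-index
--     # formula are ever computed.
--     parts = []
--     tail = []
--     s = word
--     d = 1
--     while len(s) >= 2:
--         parts.append(s[0] * d)
--         tail.append(s[-1] * d)
--         s = s[1:-1]
--         d += 1
--     if s:
--         parts.append(s * d)
--     parts.extend(reversed(tail))
--     return ''.join(parts)
-- ===== Notes on version B (the rewrite author's own statement) =====
-- stated objective: alternative
-- what changed: Replaces A's parity-branched multiplier-list construction (two ranges, reverse-sort in the even case) plus zip/concat loop by two-pointer peeling: repeatedly strip the first and last character, emitting each d times into a front and a back accumulator while d grows per layer, then join front + reversed back; no multiplier list or index formula is ever computed.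
import Mathlib
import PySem

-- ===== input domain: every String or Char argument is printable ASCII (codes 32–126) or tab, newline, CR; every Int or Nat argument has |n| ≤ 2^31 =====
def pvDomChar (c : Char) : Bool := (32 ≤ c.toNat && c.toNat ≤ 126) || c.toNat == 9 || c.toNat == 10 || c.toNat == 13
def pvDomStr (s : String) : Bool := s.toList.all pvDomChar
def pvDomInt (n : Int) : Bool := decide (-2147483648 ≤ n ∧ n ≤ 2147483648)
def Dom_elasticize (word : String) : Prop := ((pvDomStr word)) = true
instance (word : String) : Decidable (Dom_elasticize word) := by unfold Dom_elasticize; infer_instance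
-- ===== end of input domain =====

-- B replaces A's parity-branched multiplier list and zip loop by iterative two-pointer peeling
-- (strip first/last char into front/back accumulators, repetition count d grows per layer); objective: alternative.

-- ===== PORT A =====
def elasticize (word : String) : String :=
  let cs := word.toList
  let n : Int := (cs.length : Int)
  let mults : List Int :=
    if PySem.Int.mod n 2 = 1 then
      (PySem.List.pyRange 0 (PySem.Int.floordiv n 2) 1
        ++ PySem.List.pyRange (PySem.Int.floordiv n 2) (-1) (-1)).map (fun a => a + 1)
    else
      (PySem.List.pyRange 0 (PySem.Int.floordiv n 2) 1).map (fun a => a + 1)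
        ++ PySem.List.sorted ((PySem.List.pyRange 0 (PySem.Int.floordiv n 2) 1).map (fun a => a + 1)) (fun x => x) true
  let fin : List Char := (cs.zip mults).foldl (fun acc p => acc ++ PySem.List.pyRepeat [p.1] p.2) []
  String.ofList fin

-- ===== PORT B =====
-- The while loop of Source B: `len(s) >= 2` is the shape `a :: b :: t`; on it s[0] = a,
-- s[-1] = (b :: t).getLast, s[1:-1] = (b :: t).dropLast, and c*d = List.replicate d c —
-- each step is exact on these shapes.  State: (parts, tail, s, d).
def pvElastLoop (s : List Char) (d : Nat) (parts tl : List (List Char)) :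
    List (List Char) × List (List Char) × List Char × Nat :=
  match s with
  | a :: b :: t =>
      pvElastLoop ((b :: t).dropLast) (d + 1)
        (parts ++ [List.replicate d a])
        (tl ++ [List.replicate d ((b :: t).getLast (by simp))])
  | _ => (parts, tl, s, d)
termination_by s.length
decreasing_by simp [List.length_dropLast]

def elasticize_alt (word : String) : String :=
  let r := pvElastLoop word.toList 1 [] []
  -- `if s: parts.append(s * d)` then `parts.extend(reversed(tail)); return ''.join(parts)`
  let parts2 := if r.2.2.1 ≠ [] then r.1 ++ [PySem.List.pyRepeat r.2.2.1 (r.2.2.2 : Int)] else r.1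
  String.ofList ((parts2 ++ r.2.1.reverse).flatten)

-- ===== PRECONDITION & SPEC =====
def Spec_elasticize (word : String) (out : String) : Prop := out = elasticize_alt word
instance (word : String) (out : String) : Decidable (Spec_elasticize word out) := by unfold Spec_elasticize; infer_instance

-- ===== CLAIM =====
def Claim_equal_elasticize : Prop := ∀ (word : String), Dom_elasticize word → Spec_elasticize word (elasticize word)

-- ===== LEMMAS AND PROOFS =====

-- A's multiplier list is exactly the closed-form pyramid min(i+1, L-i) over i = 0..L-1, for either parity of L.
theorem pv_mults_eq (L : Nat) :
    (if PySem.Int.mod (L : Int) 2 = 1 then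
      (PySem.List.pyRange 0 (PySem.Int.floordiv (L : Int) 2) 1
        ++ PySem.List.pyRange (PySem.Int.floordiv (L : Int) 2) (-1) (-1)).map (fun a => a + 1)
    else
      (PySem.List.pyRange 0 (PySem.Int.floordiv (L : Int) 2) 1).map (fun a => a + 1)
        ++ PySem.List.sorted ((PySem.List.pyRange 0 (PySem.Int.floordiv (L : Int) 2) 1).map (fun a => a + 1)) (fun x => x) true)
    = (PySem.List.pyRange 0 (L : Int) 1).map (fun i => min (i + 1) ((L : Int) - i)) := by
  have hfd : PySem.Int.floordiv (L : Int) 2 = ((L / 2 : Nat) : Int) := by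
    exact_mod_cast PySem.Int.floordiv_natCast L 2
  have hmd : PySem.Int.mod (L : Int) 2 = ((L % 2 : Nat) : Int) := by
    exact_mod_cast PySem.Int.mod_natCast L 2
  set m : Nat := L / 2 with hm
  have hsort : PySem.List.sorted ((PySem.List.pyRange 0 (m:Int) 1).map (fun a => a + 1)) (fun x => x) true
      = (List.range m).map (fun k : Nat => (m : Int) - (k : Int)) := by
    apply PySem.List.sorted_rev_eq_of_perm_of_pairwise_gt
    · rw [PySem.List.pyRange_one 0 (m:Int)]
      have h2 : (((m:Int)) - 0).toNat = m := by omega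
      rw [h2, List.map_map]
      have hrev : ((List.range m).map (fun k : Nat => (m : Int) - (k : Int)))
          = ((List.range m).map ((fun a => a + 1) ∘ (fun k : Nat => (0:Int) + (k:Int)))).reverse := by
        apply List.ext_getElem
        · simp
        · intro k hk1 hk2
          simp only [List.length_map, List.length_range] at hk1 hk2
          simp only [List.getElem_reverse, List.length_map,
            List.length_range, List.getElem_map, List.getElem_range, Function.comp_apply]
          omega
      rw [hrev]
      exact List.reverse_perm _
    · refine List.Pairwise.map _ (fun a b h => ?_) (List.pairwise_lt_range (n := m))
      omega
  rw [hfd, hmd, hsort, PySem.List.pyRange_one 0 (L:Int), PySem.List.pyRange_one 0 (m:Int),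
    PySem.List.pyRange_neg_one (m:Int) (-1)]
  have h1 : ((L : Int) - 0).toNat = L := by omega
  have h2 : (((m:Int)) - 0).toNat = m := by omega
  have h3 : ((m:Int) - (-1)).toNat = m + 1 := by omega
  rw [h1, h2, h3]
  by_cases hp : L % 2 = 1
  · rw [if_pos (by exact_mod_cast hp)]
    rw [List.map_append]
    apply List.ext_getElem
    · simp; omega
    · intro k hk1 hk2
      simp only [List.getElem_append, List.getElem_map, List.getElem_range, List.length_map,
        List.length_range] at *
      split
      · omega
      · omega
  · rw [if_neg (by omega)]
    apply List.ext_getElem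
    · simp; omega
    · intro k hk1 hk2
      simp only [List.getElem_append, List.getElem_map, List.getElem_range, List.length_map,
        List.length_range] at *
      split
      · omega
      · omega

-- the pyramid: character j of s repeated min(j+1, |s|-j) - 1 + d times.
def pvPyr (s : List Char) (d : Nat) : List Char :=
  ((List.range s.length).map
    (fun j => List.replicate (min (j + 1) (s.length - j) - 1 + d) (s.getD j ' '))).flatten

-- peeling one layer off the pyramid.
theorem pv_pyr_cons (a b : Char) (t : List Char) (d : Nat) :
    pvPyr (a :: b :: t) d
      = List.replicate d a ++ pvPyr ((b :: t).dropLast) (d + 1)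
        ++ List.replicate d ((b :: t).getLast (by simp)) := by
  have hdl : ((b :: t).dropLast).length = t.length := by simp
  unfold pvPyr
  rw [hdl]
  have hrange : List.range ((a :: b :: t).length)
      = 0 :: ((List.range t.length ++ [t.length]).map (fun j => j + 1)) := by
    rw [show (a :: b :: t).length = t.length + 2 from rfl,
      ← List.range_succ, ← List.range_succ_eq_map]
  rw [hrange]
  simp only [List.map_cons, List.map_append, List.map_map, Function.comp_def,
    List.flatten_cons, List.flatten_append, List.map_nil, List.flatten]
  have hhead : List.replicate (min (0 + 1) ((a :: b :: t).length - 0) - 1 + d)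
        ((a :: b :: t).getD 0 ' ') = List.replicate d a := by
    rw [List.getD_cons_zero]
    congr 1
    simp
  have hlastc : (a :: b :: t).getD (t.length + 1) ' ' = (b :: t).getLast (by simp) := by
    rw [List.getD_cons_succ, List.getD_eq_getElem _ _ (by simp), List.getLast_eq_getElem]
    have h1 : (b :: t).length - 1 = t.length := by simp
    simp only [h1]
    rfl
  have hlast : List.replicate
        (min (t.length + 1 + 1) ((a :: b :: t).length - (t.length + 1)) - 1 + d)
        ((a :: b :: t).getD (t.length + 1) ' ')
      = List.replicate d ((b :: t).getLast (by simp)) := by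
    rw [hlastc]
    congr 1
    simp
  have hmid : List.map
        (fun x => List.replicate (min (x + 1 + 1) ((a :: b :: t).length - (x + 1)) - 1 + d)
          ((a :: b :: t).getD (x + 1) ' ')) (List.range t.length)
      = List.map
        (fun j => List.replicate (min (j + 1) (t.length - j) - 1 + (d + 1))
          ((b :: t).dropLast.getD j ' ')) (List.range t.length) := by
    apply List.map_congr_left
    intro j hj
    rw [List.mem_range] at hj
    have hc : (a :: b :: t).getD (j + 1) ' ' = (b :: t).dropLast.getD j ' ' := by
      rw [List.getD_cons_succ, List.getD_eq_getElem _ _ (by simp; omega),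
        List.getD_eq_getElem _ _ (by simp; omega)]
      simp [List.getElem_dropLast]
    rw [hc]
    congr 1
    simp
    omega
  rw [hhead, hlast, hmid]
  simp [List.append_assoc]

-- the loop invariant: the assembled output of the loop state is
-- parts ++ pyramid of the remaining s ++ reversed tail.
theorem pv_loop_eq (N : Nat) : ∀ (s : List Char), s.length ≤ N →
    ∀ (d : Nat) (parts tl : List (List Char)),
    ((if (pvElastLoop s d parts tl).2.2.1 ≠ [] then
        (pvElastLoop s d parts tl).1
          ++ [PySem.List.pyRepeat (pvElastLoop s d parts tl).2.2.1
               ((pvElastLoop s d parts tl).2.2.2 : Int)]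
      else (pvElastLoop s d parts tl).1)
      ++ (pvElastLoop s d parts tl).2.1.reverse).flatten
    = parts.flatten ++ pvPyr s d ++ tl.reverse.flatten := by
  induction N with
  | zero =>
    intro s hs d parts tl
    have : s = [] := List.eq_nil_of_length_eq_zero (by omega)
    subst this
    simp [pvElastLoop, pvPyr]
  | succ N ih =>
    intro s hs d parts tl
    match s with
    | [] => simp [pvElastLoop, pvPyr]
    | [c] =>
      simp [pvElastLoop, pvPyr, PySem.List.pyRepeat_singleton, List.append_assoc]
    | a :: b :: t =>
      have hle : ((b :: t).dropLast).length ≤ N := by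
        simp at hs ⊢; omega
      rw [pvElastLoop]
      rw [ih ((b :: t).dropLast) hle (d + 1) (parts ++ [List.replicate d a])
        (tl ++ [List.replicate d ((b :: t).getLast (by simp))])]
      rw [pv_pyr_cons]
      simp [List.append_assoc]

-- ===== VERDICT =====
theorem elasticize_spec : Claim_equal_elasticize := by
  intro word _
  show elasticize word = elasticize_alt word
  unfold elasticize elasticize_alt
  dsimp only
  rw [pv_mults_eq word.toList.length,
    pv_loop_eq word.toList.length word.toList (le_refl _) 1 [] [],
    PySem.List.foldl_append_eq_flatMap, List.nil_append, List.flatMap_def]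
  unfold pvPyr
  simp only [List.flatten_nil, List.nil_append, List.reverse_nil, List.append_nil]
  congr 1
  congr 1
  apply List.ext_getElem
  · simp [PySem.List.length_pyRange_one]
  · intro k hk1 hk2
    simp only [List.length_zip, List.length_map, PySem.List.length_pyRange_one] at hk1
    have hkL : k < word.toList.length := by omega
    simp only [List.getElem_zip, List.getElem_map, List.getElem_range,
      PySem.List.getElem_pyRange_one, PySem.List.pyRepeat_singleton]
    rw [List.getD_eq_getElem _ _ (by omega)]
    congr 1
    omega
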